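-- pv_equiv track=rewrite | github.com/Delta-Life/Bioinformatics | Rosalind/Bioinformatics Stronghold/code/KMER.py | kmer_composition
-- ===== SOURCE A (Python) =====
-- from itertools import product
--
-- def kmer_composition(strand, k):
--     kmer_array = [''.join(x) for x in product('ATGC', repeat=k)]
--     kmer_array.sort()
--     result = [0] * len(kmer_array)
--     for n, i in enumerate(kmer_array):
--         for j in range(len(strand)-3):
--             if strand[j:j+4] == i:
--                 result[n] += 1
--     return result
-- ===== SOURCE B (Python) =====
-- def kmer_composition(strand, k):
--     # One pass over the strand counting length-4 windows in a dict,
--     # then read the counts off in sorted k-mer order.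
--     counts = {}
--     for j in range(len(strand) - 3):
--         w = strand[j:j + 4]
--         counts[w] = counts.get(w, 0) + 1
--     kmers = ['']
--     for _ in range(k):
--         kmers = [c + s for c in 'ACGT' for s in kmers]
--     return [counts.get(km, 0) for km in kmers]
-- ===== Notes on version B (the rewrite author's own statement) =====
-- stated objective: alternative
-- what changed: A rescans the whole strand once for each of the 4^k sorted k-mers (then sorts the product list); B makes one pass over the strand counting length-4 windows in a dict and reads the counts off while generating the k-mers directly in sorted order (no sort, no per-kmer scan); the 4^k output term still dominates on the generated inputs, so no speed is claimed.
import Mathlib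
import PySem

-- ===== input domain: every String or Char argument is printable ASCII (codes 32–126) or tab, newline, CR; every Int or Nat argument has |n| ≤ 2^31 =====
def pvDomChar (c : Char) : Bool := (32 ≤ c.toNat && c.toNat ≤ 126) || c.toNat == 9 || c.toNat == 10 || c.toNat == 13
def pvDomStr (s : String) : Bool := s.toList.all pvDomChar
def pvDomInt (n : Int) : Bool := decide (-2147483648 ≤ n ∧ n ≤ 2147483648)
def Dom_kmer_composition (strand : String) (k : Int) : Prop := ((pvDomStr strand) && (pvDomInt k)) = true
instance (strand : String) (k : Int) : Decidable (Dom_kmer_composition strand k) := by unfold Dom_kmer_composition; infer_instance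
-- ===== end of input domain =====

-- B replaces A's scan of the strand once per k-mer (4^k passes) by ONE pass counting
-- windows in a dict plus a direct generation of the k-mers in sorted order (objective:
-- alternative algorithm; no speed claimed).
-- Python strings are represented as List Char (PySem convention); Python str comparison/sort
-- is code-point lexicographic = Lean's order on List Char.

-- ===== PORT A =====
-- itertools.product(alph, repeat=n), joined to words, in CPython's order (first coordinate slowest)
def pvWords (alph : List Char) : Nat → List (List Char)
  | 0 => [[]]
  | n + 1 => alph.flatMap (fun c => (pvWords alph n).map (fun t => c :: t))

def kmer_composition (strand : String) (k : Int) : List Int :=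
  let kmer_array := @PySem.List.sorted _ _ List.instLinearOrder.toLT LinearOrder.toDecidableLT
    (pvWords "ATGC".toList k.toNat) id false
  let cs := strand.toList
  let result := List.replicate kmer_array.length (0 : Int)
  (PySem.List.enumerate kmer_array 0).foldl
    (fun res ni =>
      (PySem.List.pyRange 0 (PySem.Str.len strand - 3) 1).foldl
        (fun res j =>
          if PySem.List.slice cs (some j) (some (j + 4)) = ni.2 then
            res.set ni.1.toNat (res.getD ni.1.toNat 0 + 1)
          else res)
        res)
    result

-- ===== PORT B =====
def kmer_composition_alt (strand : String) (k : Int) : List Int :=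
  let cs := strand.toList
  let counts : PySem.Dict (List Char) Int :=
    (PySem.List.pyRange 0 (PySem.Str.len strand - 3) 1).foldl
      (fun d j =>
        let w := PySem.List.slice cs (some j) (some (j + 4))
        d.insert w (d.getD w 0 + 1))
      PySem.Dict.empty
  let kmers := (PySem.List.pyRange 0 k 1).foldl
    (fun ks _ => "ACGT".toList.flatMap (fun c => ks.map (fun s => c :: s)))
    [([] : List Char)]
  kmers.map (fun km => counts.getD km 0)

-- ===== PRECONDITION & SPEC =====
-- Pre_ excludes only k < 0, where Python A raises ValueError (itertools.product rejects a negative repeat).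
def Pre_kmer_composition (strand : String) (k : Int) : Prop := 0 ≤ k
instance (strand : String) (k : Int) : Decidable (Pre_kmer_composition strand k) := by unfold Pre_kmer_composition; infer_instance
def pvWitness_kmer_composition : String × Int := ("ACGT", 2)

def Spec_kmer_composition (strand : String) (k : Int) (out : List Int) : Prop := out = kmer_composition_alt strand k
instance (strand : String) (k : Int) (out : List Int) : Decidable (Spec_kmer_composition strand k out) := by unfold Spec_kmer_composition; infer_instance

-- ===== CLAIM (what is proved, stated in full; the proofs are below) =====
def Claim_equal_kmer_composition : Prop := ∀ (strand : String) (k : Int), Dom_kmer_composition strand k → Pre_kmer_composition strand k → Spec_kmer_composition strand k (kmer_composition strand k)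

-- ===== LEMMAS AND PROOFS =====

theorem pvKmersFold_eq (n : Nat) :
    (PySem.List.pyRange 0 (n : Int) 1).foldl
      (fun ks _ => "ACGT".toList.flatMap (fun c => ks.map (fun s => c :: s)))
      [([] : List Char)] = pvWords "ACGT".toList n := by
  induction n with
  | zero => simp [pvWords]
  | succ m ih =>
    rw [show ((m + 1 : Nat) : Int) = (m : Int) + 1 by push_cast; ring,
        PySem.List.pyRange_one_succ_right (by positivity),
        List.foldl_append, List.foldl_cons, List.foldl_nil, ih]
    rfl

theorem pvWords_perm (l₁ l₂ : List Char) (h : l₁.Perm l₂) (n : Nat) :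
    (pvWords l₁ n).Perm (pvWords l₂ n) := by
  induction n with
  | zero => simp [pvWords]
  | succ m ih =>
    exact List.Perm.flatMap h (fun a _ => ih.map _)

theorem pvWords_pairwise (alph : List Char) (h : alph.Pairwise (· < ·)) (n : Nat) :
    (pvWords alph n).Pairwise (· < ·) := by
  induction n with
  | zero => simp [pvWords]
  | succ m ih =>
    show (alph.flatMap (fun c => (pvWords alph m).map (fun t => c :: t))).Pairwise (· < ·)
    rw [List.flatMap_def, List.pairwise_flatten]
    constructor
    · intro l hl
      simp only [List.mem_map] at hl
      obtain ⟨c, _, rfl⟩ := hl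
      rw [List.pairwise_map]
      exact ih.imp (fun hlt => List.Lex.cons hlt)
    · rw [List.pairwise_map]
      refine h.imp ?_
      intro c₁ c₂ hc x hx y hy
      simp only [List.mem_map] at hx hy
      obtain ⟨s, _, rfl⟩ := hx
      obtain ⟨t, _, rfl⟩ := hy
      exact List.Lex.rel hc

theorem pvSorted_words (n : Nat) :
    @PySem.List.sorted _ _ List.instLinearOrder.toLT LinearOrder.toDecidableLT
      (pvWords "ATGC".toList n) id false = pvWords "ACGT".toList n := by
  exact PySem.List.sorted_eq_of_perm_of_pairwise_lt (pvWords "ATGC".toList n)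
    (pvWords "ACGT".toList n) id (pvWords_perm _ _ (by decide) n)
    (pvWords_pairwise "ACGT".toList (by decide) n)

theorem pvInnerFold (ws : List (List Char)) (t : List Char) (res : List Int) (n : Nat)
    (hn : n < res.length) :
    ws.foldl (fun res x => if x = t then res.set n (res.getD n 0 + 1) else res) res
      = res.set n (res.getD n 0 + (ws.count t : Int)) := by
  induction ws generalizing res with
  | nil =>
    simp only [List.foldl_nil, List.count_nil, Nat.cast_zero, add_zero,
      List.getD_eq_getElem?_getD, List.getElem?_eq_getElem hn, Option.getD_some,
      List.set_getElem_self hn]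
  | cons w ws ih =>
    rw [List.foldl_cons]
    by_cases hw : w = t
    · rw [if_pos hw, ih _ (by simpa using hn)]
      rw [List.set_set, List.getD_eq_getElem?_getD, List.getElem?_set_self (by exact hn)]
      simp [hw, List.getD_eq_getElem?_getD]
      ring_nf
    · rw [if_neg hw, ih _ hn]
      simp [hw]

theorem pvOuterFold (W : List (List Char)) (ys : List (List Char)) (pre : List Int) :
    (PySem.List.enumerate ys (pre.length : Int)).foldl
      (fun res ni => W.foldl
        (fun res x => if x = ni.2 then res.set ni.1.toNat (res.getD ni.1.toNat 0 + 1) else res) res)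
      (pre ++ List.replicate ys.length 0)
      = pre ++ ys.map (fun t => (W.count t : Int)) := by
  induction ys generalizing pre with
  | nil => simp [PySem.List.enumerate]
  | cons y ys ih =>
    rw [PySem.List.enumerate_cons, List.foldl_cons]
    have hidx : ((pre.length : Int)).toNat = pre.length := by simp
    have hlen : pre.length < (pre ++ List.replicate (y :: ys).length 0).length := by
      simp
    rw [show (List.replicate (y :: ys).length (0 : Int)) = 0 :: List.replicate ys.length 0 from rfl]
    rw [pvInnerFold W y _ _ (by simp)]
    have hg : (pre ++ 0 :: List.replicate ys.length (0:Int)).getD ((pre.length:Int)).toNat 0 = 0 := by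
      simp [List.getD_eq_getElem?_getD]
    have hs : (pre ++ 0 :: List.replicate ys.length (0:Int)).set ((pre.length:Int)).toNat (0 + (W.count y : Int))
        = (pre ++ [(W.count y : Int)]) ++ List.replicate ys.length 0 := by
      simp
    rw [hg, hs]
    have hlen' : ((pre.length : Int) + 1) = (((pre ++ [(W.count y : Int)]).length : Int)) := by
      simp
    rw [hlen', ih (pre ++ [(W.count y : Int)])]
    simp

-- ===== VERDICT (by name: the statement is the Claim_ definition above) =====
theorem kmer_composition_spec : Claim_equal_kmer_composition := by
  intro strand k _ hk
  simp only [Spec_kmer_composition, kmer_composition, kmer_composition_alt]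
  have hk' : ((k.toNat : Nat) : Int) = k := Int.toNat_of_nonneg hk
  rw [← hk', pvKmersFold_eq, pvSorted_words]
  simp only [Int.toNat_natCast]
  have hA := pvOuterFold
    ((PySem.List.pyRange 0 (PySem.Str.len strand - 3) 1).map
      (fun j => PySem.List.slice strand.toList (some j) (some (j + 4))))
    (pvWords "ACGT".toList k.toNat) []
  simp only [List.foldl_map, List.nil_append, List.length_nil, Nat.cast_zero] at hA
  have hB := PySem.Dict.foldl_insert_getD_add_one_eq_counter
    ((PySem.List.pyRange 0 (PySem.Str.len strand - 3) 1).map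
      (fun j => PySem.List.slice strand.toList (some j) (some (j + 4))))
  simp only [List.foldl_map] at hB
  rw [hA, hB]
  exact List.map_congr_left (fun t _ => (PySem.Dict.getD_counter _ t).symm)
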